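-- pv_equiv track=rewrite | github.com/gitgudhubbed/PythonForBeg | lect7.py | multiplyNumbers
-- ===== SOURCE A (Python) =====
-- def multiplyNumbers(num1,num2):
--     total = 0
--     if type(num1) != int or type(num2) != int:
--         return -1
--     if num2 <=0:
--         num2 = -num2
--         num1 = -num1
--     if num1 and num2 < 100:
--         for i in range(num2):
--             total = total + num1
--         return total
--     else:
--         return -1
-- ===== SOURCE B (Python) =====
-- def multiplyNumbers(num1, num2):
--     if type(num1) != int or type(num2) != int:
--         return -1
--     if num1 != 0 and abs(num2) < 100:
--         return num1 * num2
--     return -1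
-- ===== Notes on version B (the rewrite author's own statement) =====
-- stated objective: simpler
-- what changed: Replaces the sign-normalisation plus repeated-addition loop with a single guard on abs(num2) and the closed-form product num1*num2.
import Mathlib
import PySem

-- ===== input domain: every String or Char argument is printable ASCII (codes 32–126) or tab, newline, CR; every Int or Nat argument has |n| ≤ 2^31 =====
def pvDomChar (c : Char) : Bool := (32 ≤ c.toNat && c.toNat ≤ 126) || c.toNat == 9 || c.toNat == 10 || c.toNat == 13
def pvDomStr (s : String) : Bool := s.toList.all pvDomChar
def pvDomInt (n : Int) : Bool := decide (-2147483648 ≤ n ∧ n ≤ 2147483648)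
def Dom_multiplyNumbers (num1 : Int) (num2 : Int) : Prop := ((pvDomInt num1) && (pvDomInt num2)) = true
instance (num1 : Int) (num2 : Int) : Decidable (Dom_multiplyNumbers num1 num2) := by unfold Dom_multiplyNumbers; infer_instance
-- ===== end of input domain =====

-- B replaces the sign-normalisation and repeated-addition loop by one guard on |num2| and the closed-form product (simpler).
-- The Python `type(...) != int` guard is vacuous on Int × Int inputs and ports to the always-false branch being dropped.

-- ===== PORT A =====
def multiplyNumbers (num1 : Int) (num2 : Int) : Int :=
  -- total = 0; the type(...) != int check cannot fire for Int arguments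
  let p := if num2 ≤ 0 then (-num1, -num2) else (num1, num2)
  let num1 := p.1
  let num2 := p.2
  if num1 ≠ 0 ∧ num2 < 100 then
    (PySem.List.pyRange 0 num2 1).foldl (fun total _ => total + num1) 0
  else
    -1

-- ===== PORT B =====
def multiplyNumbers_alt (num1 : Int) (num2 : Int) : Int :=
  if num1 ≠ 0 ∧ |num2| < 100 then num1 * num2 else -1

-- ===== PRECONDITION & SPEC =====
def Spec_multiplyNumbers (num1 : Int) (num2 : Int) (out : Int) : Prop := out = multiplyNumbers_alt num1 num2
instance (num1 : Int) (num2 : Int) (out : Int) : Decidable (Spec_multiplyNumbers num1 num2 out) := by unfold Spec_multiplyNumbers; infer_instance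

-- ===== CLAIM (what is proved, stated in full; the proofs are below) =====
def Claim_equal_multiplyNumbers : Prop := ∀ (num1 : Int) (num2 : Int), Dom_multiplyNumbers num1 num2 → Spec_multiplyNumbers num1 num2 (multiplyNumbers num1 num2)

-- ===== LEMMAS AND PROOFS =====

theorem foldl_add_const {α : Type} (l : List α) (c t : Int) :
    l.foldl (fun total _ => total + c) t = t + l.length * c := by
  induction l generalizing t with
  | nil => simp
  | cons x xs ih => simp [List.foldl, ih]; ring

theorem foldl_pyRange_mul (n c : Int) :
    (PySem.List.pyRange 0 n 1).foldl (fun total _ => total + c) 0 = n.toNat * c := by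
  rw [foldl_add_const]
  simp [PySem.List.length_pyRange_one]

-- ===== VERDICT (by name: the statement is the Claim_ definition above) =====
theorem multiplyNumbers_spec : Claim_equal_multiplyNumbers := by
  intro num1 num2 _
  unfold Spec_multiplyNumbers multiplyNumbers multiplyNumbers_alt
  by_cases h : num2 ≤ 0
  · simp only [if_pos h, foldl_pyRange_mul]
    rw [Int.toNat_of_nonneg (by omega : (0:Int) ≤ -num2), abs_of_nonpos h]
    split_ifs with h1 h2 h2
    · ring
    · exact absurd ⟨by omega, by omega⟩ h2
    · exact absurd ⟨by omega, by omega⟩ h1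
    · rfl
  · simp only [if_neg h, foldl_pyRange_mul]
    rw [Int.toNat_of_nonneg (by omega : (0:Int) ≤ num2), abs_of_pos (by omega : (0:Int) < num2)]
    split_ifs with h1
    · ring
    · rfl
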